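-- pv_equiv track=rewrite | github.com/Dynamic-Capital/Dynamic-Capital | dynamic_cognition/integration.py | _build_knowledge_index
-- ===== SOURCE A (Python) =====
-- from typing import Iterable, Mapping, MutableMapping, Sequence
--
-- def _deduplicate(items: Iterable[str]) -> tuple[str, ...]:
--     seen: set[str] = set()
--     ordered: list[str] = []
--     for item in items:
--         text = str(item).strip()
--         if text and text not in seen:
--             seen.add(text)
--             ordered.append(text)
--     return tuple(ordered)
--
-- def _tokenise(values: Iterable[str]) -> tuple[str, ...]:
--     tokens: list[str] = []
--     seen: set[str] = set()
--     for raw in values: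
--         text = str(raw).strip().lower()
--         if not text or text in seen:
--             continue
--         tokens.append(text)
--         seen.add(text)
--         normalised = text.replace("/", " ").replace("-", " ").replace("_", " ")
--         for chunk in normalised.split():
--             if chunk and chunk not in seen:
--                 seen.add(chunk)
--                 tokens.append(chunk)
--     return tuple(tokens)
--
-- def _build_knowledge_index(
--     index: Mapping[str, Sequence[str]] | None,
-- ) -> Mapping[str, tuple[str, ...]]:
--     if not index:
--         return {}
--     resolved: MutableMapping[str, list[str]] = {}
--     for raw_tag, resources in index.items():
--         if resources is None:
--             continue
--         tokens = _tokenise((raw_tag,))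
--         cleaned_resources = _deduplicate(resources)
--         if not cleaned_resources:
--             continue
--         for token in tokens:
--             resolved.setdefault(token, [])
--             bucket = resolved[token]
--             for resource in cleaned_resources:
--                 if resource not in bucket:
--                     bucket.append(resource)
--     return {key: tuple(values) for key, values in resolved.items()}
-- ===== SOURCE B (Python) =====
-- # B: two-phase collect-then-dedup. Phase 1 appends each tag's stripped nonempty
-- # resources to every token bucket with no membership scanning; phase 2 dedups each
-- # bucket once, preserving first-occurrence order.
-- from typing import Iterable, Mapping, MutableMapping, Sequence
--
--
-- def _dedup_ordered(items):
--     seen = set()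
--     out = []
--     for item in items:
--         if item not in seen:
--             seen.add(item)
--             out.append(item)
--     return out
--
--
-- def _tokenise_tag(raw_tag):
--     text = str(raw_tag).strip().lower()
--     if not text:
--         return []
--     parts = text.replace("/", " ").replace("-", " ").replace("_", " ").split()
--     return _dedup_ordered([text] + parts)
--
--
-- def _build_knowledge_index(index):
--     if not index:
--         return {}
--     resolved = {}
--     for raw_tag, resources in index.items():
--         if resources is None:
--             continue
--         cleaned = [text for text in (str(r).strip() for r in resources) if text]
--         if not cleaned:
--             continue
--         for token in _tokenise_tag(raw_tag):
--             resolved.setdefault(token, []).extend(cleaned)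
--     return {key: tuple(_dedup_ordered(values)) for key, values in resolved.items()}
-- ===== Notes on version B (the rewrite author's own statement) =====
-- stated objective: alternative
-- what changed: Replaces A's interleaved per-tag dedup plus per-resource membership scan of each growing bucket with a two-phase structure: phase 1 plainly appends every stripped nonempty resource to each token bucket (duplicates allowed), phase 2 deduplicates each bucket once in first-occurrence order.
import Mathlib
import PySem

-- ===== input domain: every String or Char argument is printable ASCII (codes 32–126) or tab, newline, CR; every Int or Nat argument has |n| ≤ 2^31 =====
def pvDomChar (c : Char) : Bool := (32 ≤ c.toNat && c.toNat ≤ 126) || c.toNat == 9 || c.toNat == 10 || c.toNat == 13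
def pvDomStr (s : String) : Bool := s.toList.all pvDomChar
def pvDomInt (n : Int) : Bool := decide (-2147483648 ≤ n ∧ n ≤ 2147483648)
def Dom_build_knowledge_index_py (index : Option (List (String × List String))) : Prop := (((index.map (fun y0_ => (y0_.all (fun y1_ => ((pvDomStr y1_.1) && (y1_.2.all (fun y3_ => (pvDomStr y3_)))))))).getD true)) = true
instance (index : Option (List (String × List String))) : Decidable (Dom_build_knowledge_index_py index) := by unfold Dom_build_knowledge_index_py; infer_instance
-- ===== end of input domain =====

-- B replaces A's interleaved per-tag dedup + per-resource membership scan of each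
-- growing bucket by a two-phase collect-then-dedup structure (objective: alternative).

-- ===== PORT A =====
-- _deduplicate: strip each item, keep first occurrences of nonempty texts
def pyDeduplicate (items : List String) : List String :=
  (items.foldl
    (fun (st : PySem.Set String × List String) item =>
      let text := PySem.Str.strip item
      if text ≠ "" ∧ ¬ PySem.Set.contains st.1 text then
        (PySem.Set.add st.1 text, st.2 ++ [text])
      else st)
    (PySem.Set.empty, [])).2

-- _tokenise
def pyTokenise (values : List String) : List String :=
  (values.foldl
    (fun (st : List String × PySem.Set String) raw =>
      let text := PySem.Str.lower (PySem.Str.strip raw)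
      if text = "" ∨ PySem.Set.contains st.2 text then st
      else
        let tokens := st.1 ++ [text]
        let seen := PySem.Set.add st.2 text
        let normalised := PySem.Str.replace (PySem.Str.replace (PySem.Str.replace text "/" " ") "-" " ") "_" " "
        (PySem.Str.split₀ normalised).foldl
          (fun (st2 : List String × PySem.Set String) chunk =>
            if chunk ≠ "" ∧ ¬ PySem.Set.contains st2.2 chunk then
              (st2.1 ++ [chunk], PySem.Set.add st2.2 chunk)
            else st2)
          (tokens, seen))
    ([], PySem.Set.empty)).1

-- 'for resource in cleaned_resources: if resource not in bucket: bucket.append(resource)'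
def pyStepTokenA (cleaned : List String) (resolved : PySem.Dict String (List String)) (token : String) : PySem.Dict String (List String) :=
  let resolved := PySem.Dict.setdefault resolved token []
  let bucket := PySem.Dict.getD resolved token []
  let bucket := cleaned.foldl (fun b r => if ¬ r ∈ b then b ++ [r] else b) bucket
  PySem.Dict.insert resolved token bucket

-- body of 'for raw_tag, resources in index.items()'; 'resources is None' is
-- unrepresentable for List String, so that skip has no Lean counterpart
def pyStepTagA (resolved : PySem.Dict String (List String)) (pair : String × List String) : PySem.Dict String (List String) :=
  let tokens := pyTokenise [pair.1]
  let cleaned := pyDeduplicate pair.2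
  if cleaned = [] then resolved
  else tokens.foldl (pyStepTokenA cleaned) resolved

def build_knowledge_index_py (index : Option (List (String × List String))) : List (String × List String) :=
  match index with
  | none => []
  | some idx =>
    if idx = [] then []
    else
      let resolved := idx.foldl pyStepTagA PySem.Dict.empty
      resolved.items.map (fun kv => (kv.1, kv.2))

-- ===== PORT B =====
-- _dedup_ordered: first occurrences, no stripping
def dedupOrdered (items : List String) : List String :=
  (items.foldl
    (fun (st : PySem.Set String × List String) item =>
      if PySem.Set.contains st.1 item then st
      else (PySem.Set.add st.1 item, st.2 ++ [item]))
    (PySem.Set.empty, [])).2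

-- _tokenise_tag
def tokeniseTag (raw_tag : String) : List String :=
  let text := PySem.Str.lower (PySem.Str.strip raw_tag)
  if text = "" then []
  else
    let parts := PySem.Str.split₀ (PySem.Str.replace (PySem.Str.replace (PySem.Str.replace text "/" " ") "-" " ") "_" " ")
    dedupOrdered (text :: parts)

-- 'resolved.setdefault(token, []).extend(cleaned)'
def stepTokenB (cleaned : List String) (resolved : PySem.Dict String (List String)) (token : String) : PySem.Dict String (List String) :=
  PySem.Dict.insert resolved token (PySem.Dict.getD resolved token [] ++ cleaned)

def stepTagB (resolved : PySem.Dict String (List String)) (pair : String × List String) : PySem.Dict String (List String) :=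
  let cleaned := (pair.2.map PySem.Str.strip).filter (fun t => t ≠ "")
  if cleaned = [] then resolved
  else (tokeniseTag pair.1).foldl (stepTokenB cleaned) resolved

def build_knowledge_index_py_alt (index : Option (List (String × List String))) : List (String × List String) :=
  match index with
  | none => []
  | some idx =>
    if idx = [] then []
    else
      let resolved := idx.foldl stepTagB PySem.Dict.empty
      resolved.items.map (fun kv => (kv.1, dedupOrdered kv.2))

-- ===== PRECONDITION & SPEC =====
-- Pre_ excludes association lists with duplicate tag keys: they do not correspond to a
-- Python dict input (dict construction collapses duplicate keys before A ever runs).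
def Pre_build_knowledge_index_py (index : Option (List (String × List String))) : Prop :=
  ((index.getD []).map Prod.fst).Nodup
instance (index : Option (List (String × List String))) : Decidable (Pre_build_knowledge_index_py index) := by unfold Pre_build_knowledge_index_py; infer_instance

def pvWitness_build_knowledge_index_py : (Option (List (String × List String))) :=
  some [("Ops/Risk", ["  alpha ", "alpha", "beta"]), ("risk", ["gamma", ""])]

def Spec_build_knowledge_index_py (index : Option (List (String × List String))) (out : List (String × List String)) : Prop := out = build_knowledge_index_py_alt index
instance (index : Option (List (String × List String))) (out : List (String × List String)) : Decidable (Spec_build_knowledge_index_py index out) := by unfold Spec_build_knowledge_index_py; infer_instance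

-- ===== CLAIM (what is proved, stated in full; the proofs are below) =====
def Claim_equal_build_knowledge_index_py : Prop := ∀ (index : Option (List (String × List String))), Dom_build_knowledge_index_py index → Pre_build_knowledge_index_py index → Spec_build_knowledge_index_py index (build_knowledge_index_py index)

-- ===== LEMMAS AND PROOFS =====

-- first-occurrence dedup: the (seen, out) pair stays equal componentwise
lemma dedupOrdered_fold (items : List String) (s : List String) :
    items.foldl
      (fun (st : PySem.Set String × List String) item =>
        if PySem.Set.contains st.1 item then st
        else (PySem.Set.add st.1 item, st.2 ++ [item])) (s, s)
    = (items.foldl PySem.Set.add s, items.foldl PySem.Set.add s) := by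
  induction items generalizing s with
  | nil => rfl
  | cons x t ih =>
    simp only [List.foldl_cons]
    by_cases hx : x ∈ s
    · rw [if_pos ((PySem.Set.contains_iff s x).mpr hx), PySem.Set.add_of_mem hx]
      exact ih s
    · rw [if_neg (by simp [hx]), PySem.Set.add_of_not_mem hx]
      exact ih (s ++ [x])

lemma dedupOrdered_eq_ofList (items : List String) :
    dedupOrdered items = PySem.Set.ofList items := by
  unfold dedupOrdered
  rw [show (PySem.Set.empty : PySem.Set String) = ([] : List String) from rfl,
      dedupOrdered_fold, PySem.Set.ofList_eq_foldl]

-- A's _deduplicate is the first-occurrence dedup of the stripped nonempty resources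
lemma pyDeduplicate_fold (items : List String) (s : List String) :
    items.foldl
      (fun (st : PySem.Set String × List String) item =>
        let text := PySem.Str.strip item
        if text ≠ "" ∧ ¬ PySem.Set.contains st.1 text then
          (PySem.Set.add st.1 text, st.2 ++ [text])
        else st) (s, s)
    = (((items.map PySem.Str.strip).filter (fun t => t ≠ "")).foldl PySem.Set.add s,
       ((items.map PySem.Str.strip).filter (fun t => t ≠ "")).foldl PySem.Set.add s) := by
  induction items generalizing s with
  | nil => rfl
  | cons x t ih =>
    simp only [List.foldl_cons, List.map_cons, List.filter_cons]
    by_cases h0 : PySem.Str.strip x = ""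
    · simp only [h0, ne_eq, not_true_eq_false, false_and, if_false, decide_false]
      exact ih s
    · simp only [ne_eq, h0, not_false_eq_true, decide_true, if_true, true_and, List.foldl_cons]
      by_cases hx : PySem.Str.strip x ∈ s
      · rw [if_neg (by simp [hx]), PySem.Set.add_of_mem hx]
        exact ih s
      · rw [if_pos (by simp [hx]), PySem.Set.add_of_not_mem hx]
        exact ih (s ++ [PySem.Str.strip x])

lemma pyDeduplicate_eq (resources : List String) :
    pyDeduplicate resources
      = PySem.Set.ofList ((resources.map PySem.Str.strip).filter (fun t => t ≠ "")) := by
  unfold pyDeduplicate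
  rw [show (PySem.Set.empty : PySem.Set String) = ([] : List String) from rfl,
      pyDeduplicate_fold, PySem.Set.ofList_eq_foldl]

-- chunks produced by str.split() are never empty
lemma split₀_go_ne_nil (s cur : List Char) (acc : List (List Char))
    (hacc : ∀ x ∈ acc, x ≠ []) : ∀ x ∈ PySem.Chars.split₀.go s cur acc, x ≠ [] := by
  induction s generalizing cur acc with
  | nil =>
    intro x hx
    unfold PySem.Chars.split₀.go at hx
    by_cases hc : cur.isEmpty
    · rw [if_pos hc, List.mem_reverse] at hx; exact hacc x hx
    · rw [if_neg hc, List.mem_reverse] at hx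
      rcases List.mem_cons.mp hx with h | h
      · subst h; simpa [List.isEmpty_iff] using hc
      · exact hacc x h
  | cons c rest ih =>
    intro x hx
    unfold PySem.Chars.split₀.go at hx
    by_cases hs : PySem.Chars.isspace c
    · rw [if_pos hs] at hx
      by_cases hc : cur.isEmpty
      · rw [if_pos hc] at hx; exact ih [] acc hacc x hx
      · rw [if_neg hc] at hx
        refine ih [] (cur.reverse :: acc) ?_ x hx
        intro y hy
        rcases List.mem_cons.mp hy with h | h
        · subst h; simpa [List.isEmpty_iff] using hc
        · exact hacc y h
    · rw [if_neg hs] at hx; exact ih (c :: cur) acc hacc x hx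

lemma mem_split₀_ne (s : String) : ∀ c ∈ PySem.Str.split₀ s, c ≠ "" := by
  intro c hc hceq
  have h1 : c.toList ∈ List.map String.toList (PySem.Str.split₀ s) :=
    List.mem_map_of_mem hc
  rw [PySem.Str.split₀_map_toList] at h1
  have h2 : c.toList ≠ [] := by
    unfold PySem.Chars.split₀ at h1
    exact split₀_go_ne_nil s.toList [] [] (by simp) c.toList h1
  rw [hceq] at h2
  exact h2 rfl

-- inner chunk loop of _tokenise: the pair (tokens, seen) stays equal componentwise
lemma tokenInner_fold (parts : List String) (hne : ∀ c ∈ parts, c ≠ "") (s : List String) :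
    parts.foldl
      (fun (st2 : List String × PySem.Set String) chunk =>
        if chunk ≠ "" ∧ ¬ PySem.Set.contains st2.2 chunk then
          (st2.1 ++ [chunk], PySem.Set.add st2.2 chunk)
        else st2) (s, s)
    = (parts.foldl PySem.Set.add s, parts.foldl PySem.Set.add s) := by
  induction parts generalizing s with
  | nil => rfl
  | cons x t ih =>
    have hx0 : x ≠ "" := hne x (List.mem_cons_self ..)
    have hne' : ∀ c ∈ t, c ≠ "" := fun c hc => hne c (List.mem_cons_of_mem _ hc)
    simp only [List.foldl_cons]
    by_cases hx : x ∈ s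
    · rw [if_neg (by simp [hx]), PySem.Set.add_of_mem hx]
      exact ih hne' s
    · rw [if_pos ⟨hx0, by simp [hx]⟩, PySem.Set.add_of_not_mem hx]
      exact ih hne' (s ++ [x])

-- A's _tokenise on the one-element tuple (raw_tag,) is B's _tokenise_tag
lemma tokens_eq (raw : String) : pyTokenise [raw] = tokeniseTag raw := by
  unfold pyTokenise tokeniseTag
  simp only [List.foldl_cons, List.foldl_nil]
  by_cases h0 : PySem.Str.lower (PySem.Str.strip raw) = ""
  · simp [h0]
  · rw [if_neg (by simp [h0, PySem.Set.contains])]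
    rw [if_neg h0]
    rw [show PySem.Set.add (PySem.Set.empty : PySem.Set String)
          (PySem.Str.lower (PySem.Str.strip raw))
        = [PySem.Str.lower (PySem.Str.strip raw)] from
        PySem.Set.add_of_not_mem (by simp [PySem.Set.empty])]
    rw [List.nil_append]
    rw [tokenInner_fold _ (mem_split₀_ne _) _]
    rw [dedupOrdered_eq_ofList, PySem.Set.ofList_eq_foldl, List.foldl_cons]
    rw [show PySem.Set.add ([] : PySem.Set String) (PySem.Str.lower (PySem.Str.strip raw))
        = [PySem.Str.lower (PySem.Str.strip raw)] from
        PySem.Set.add_of_not_mem (by simp)]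

-- the relation between the two resolved dicts: same keys, A's buckets are the
-- first-occurrence dedups of B's buckets
def phiKI : (String × List String) → (String × List String) :=
  fun kv => (kv.1, PySem.Set.ofList kv.2)

lemma get?_mk_map_phi (l : List (String × List String)) (k : String) :
    (PySem.Dict.mk (l.map phiKI)).get? k
      = ((PySem.Dict.mk l).get? k).map (fun v => PySem.Set.ofList v) := by
  induction l with
  | nil => rfl
  | cons p t ih =>
    obtain ⟨pk, pv⟩ := p
    simp only [List.map_cons, phiKI, PySem.Dict.get?_mk_cons]
    by_cases h : pk == k
    · simp [h]
    · simp only [h, Bool.false_eq_true, if_false]; exact ih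

lemma contains_mk_map_phi (l : List (String × List String)) (k : String) :
    (PySem.Dict.mk (l.map phiKI)).contains k = (PySem.Dict.mk l).contains k := by
  rw [PySem.Dict.contains_eq_isSome_get?, PySem.Dict.contains_eq_isSome_get?, get?_mk_map_phi]
  cases (PySem.Dict.mk l).get? k <;> rfl

lemma contains_phi (dA dB : PySem.Dict String (List String))
    (h : dA.items = dB.items.map phiKI) (k : String) :
    dA.contains k = dB.contains k := by
  have : dA = PySem.Dict.mk (dB.items.map phiKI) := PySem.Dict.ext h
  rw [this, contains_mk_map_phi]

lemma getD_phi (dA dB : PySem.Dict String (List String))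
    (h : dA.items = dB.items.map phiKI) (k : String) :
    dA.getD k [] = PySem.Set.ofList (dB.getD k []) := by
  have hA : dA = PySem.Dict.mk (dB.items.map phiKI) := PySem.Dict.ext h
  rw [hA, PySem.Dict.getD, PySem.Dict.getD, get?_mk_map_phi]
  cases (PySem.Dict.mk dB.items).get? k <;> rfl

lemma not_contains_fst_ne {ν : Type} (d : PySem.Dict String ν) (k : String)
    (h : d.contains k = false) : ∀ p ∈ d.items, (p.1 == k) = false := by
  intro p hp
  have := List.any_eq_false.mp h p hp
  simpa using this

lemma insert_insert_self (d : PySem.Dict String (List String)) (k : String)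
    (v0 v : List String) : (d.insert k v0).insert k v = d.insert k v := by
  apply PySem.Dict.ext
  by_cases h : d.contains k = true
  · rw [PySem.Dict.items_insert_of_contains _ _ ((d.contains_insert_self k v0) ▸ rfl),
        PySem.Dict.items_insert_of_contains _ _ h,
        PySem.Dict.items_insert_of_contains _ _ h, List.map_map]
    apply List.map_congr_left
    intro p _
    by_cases hp : p.1 = k <;> simp [hp]
  · have hf : d.contains k = false := by simpa using h
    rw [PySem.Dict.items_insert_of_contains _ _ (PySem.Dict.contains_insert_self d k v0),
        PySem.Dict.items_insert_of_not_contains _ _ hf,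
        PySem.Dict.items_insert_of_not_contains _ _ hf,
        List.map_append]
    congr 1
    · have : ∀ p ∈ d.items,
          (fun (p : String × List String) => if (p.1 == k) = true then (k, v) else p) p = id p := by
        intro p hp
        simp only [not_contains_fst_ne d k hf p hp, Bool.false_eq_true, if_false, id]
      rw [List.map_congr_left this, List.map_id]
    · simp

lemma setdefault_eq (d : PySem.Dict String (List String)) (k : String) (v : List String) :
    d.setdefault k v = if d.contains k = true then d else d.insert k v := by
  unfold PySem.Dict.setdefault PySem.Dict.insert
  by_cases h : d.contains k = true <;> simp [h]

lemma setdefault_insert (d : PySem.Dict String (List String)) (k : String)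
    (v0 v : List String) : (d.setdefault k v0).insert k v = d.insert k v := by
  rw [setdefault_eq]
  by_cases h : d.contains k = true
  · rw [if_pos h]
  · rw [if_neg h]; exact insert_insert_self d k v0 v

lemma getD_setdefault (d : PySem.Dict String (List String)) (k : String) :
    (d.setdefault k []).getD k [] = d.getD k [] := by
  rw [setdefault_eq]
  by_cases h : d.contains k = true
  · rw [if_pos h]
  · rw [if_neg h, PySem.Dict.getD_insert_self,
        PySem.Dict.getD_of_not_contains _ _ (by simpa using h)]

lemma insert_phi (dA dB : PySem.Dict String (List String))
    (h : dA.items = dB.items.map phiKI) (k : String) (v : List String) :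
    (dA.insert k (PySem.Set.ofList v)).items = (dB.insert k v).items.map phiKI := by
  have hc := contains_phi dA dB h k
  by_cases hk : dB.contains k = true
  · rw [PySem.Dict.items_insert_of_contains _ _ (hc.trans hk),
        PySem.Dict.items_insert_of_contains _ _ hk, h, List.map_map, List.map_map]
    apply List.map_congr_left
    intro p _
    by_cases hp : p.1 = k <;> simp [phiKI, hp]
  · have hkf : dB.contains k = false := by simpa using hk
    rw [PySem.Dict.items_insert_of_not_contains _ _ (hc.trans hkf),
        PySem.Dict.items_insert_of_not_contains _ _ hkf, h, List.map_append]
    rfl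

-- the bucket loop of A is Set.update
lemma bucket_fold_eq_update (cleaned : List String) (bucket : List String) :
    cleaned.foldl (fun b r => if ¬ r ∈ b then b ++ [r] else b) bucket
      = PySem.Set.update bucket cleaned := by
  rw [PySem.Set.update]
  have hstep : (fun (b : List String) r => if ¬ r ∈ b then b ++ [r] else b)
      = fun (b : PySem.Set String) r => PySem.Set.add b r := by
    funext b r
    rw [PySem.Set.add_eq_ite]
    by_cases hr : r ∈ b <;> simp [hr]
  rw [hstep]

lemma update_ofList_right (s : PySem.Set String) (ys : List String) :
    s.update (PySem.Set.ofList ys) = s.update ys := by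
  rw [PySem.Set.update_eq_append_filter, PySem.Set.update_eq_append_filter,
      PySem.Set.ofList_ofList]

lemma stepToken_phi (cleanedB : List String) (dA dB : PySem.Dict String (List String))
    (h : dA.items = dB.items.map phiKI) (token : String) :
    (pyStepTokenA (PySem.Set.ofList cleanedB) dA token).items
      = (stepTokenB cleanedB dB token).items.map phiKI := by
  unfold pyStepTokenA stepTokenB
  simp only []
  rw [setdefault_insert, getD_setdefault, bucket_fold_eq_update, getD_phi dA dB h,
      update_ofList_right, ← PySem.Set.ofList_append]
  exact insert_phi dA dB h token _

lemma foldTokens_phi (cleanedB : List String) (tokens : List String) :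
    ∀ (dA dB : PySem.Dict String (List String)), dA.items = dB.items.map phiKI →
    (tokens.foldl (pyStepTokenA (PySem.Set.ofList cleanedB)) dA).items
      = (tokens.foldl (stepTokenB cleanedB) dB).items.map phiKI := by
  induction tokens with
  | nil => intro dA dB h; exact h
  | cons tok t ih =>
    intro dA dB h
    simp only [List.foldl_cons]
    exact ih _ _ (stepToken_phi cleanedB dA dB h tok)

lemma ofList_ne_nil (ys : List String) (h : ys ≠ []) : PySem.Set.ofList ys ≠ [] := by
  cases ys with
  | nil => exact absurd rfl h
  | cons y t => rw [PySem.Set.ofList_cons]; exact List.cons_ne_nil _ _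

lemma stepTag_phi (dA dB : PySem.Dict String (List String))
    (h : dA.items = dB.items.map phiKI) (pair : String × List String) :
    (pyStepTagA dA pair).items = (stepTagB dB pair).items.map phiKI := by
  unfold pyStepTagA stepTagB
  simp only []
  rw [tokens_eq, pyDeduplicate_eq]
  by_cases hc : (pair.2.map PySem.Str.strip).filter (fun t => t ≠ "") = []
  · rw [hc, show PySem.Set.ofList ([] : List String) = [] from rfl, if_pos rfl, if_pos rfl]
    exact h
  · rw [if_neg (ofList_ne_nil _ hc), if_neg hc]
    exact foldTokens_phi _ _ dA dB h

lemma foldTag_phi (idx : List (String × List String)) :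
    ∀ (dA dB : PySem.Dict String (List String)), dA.items = dB.items.map phiKI →
    (idx.foldl pyStepTagA dA).items = (idx.foldl stepTagB dB).items.map phiKI := by
  induction idx with
  | nil => intro dA dB h; exact h
  | cons p t ih =>
    intro dA dB h
    simp only [List.foldl_cons]
    exact ih _ _ (stepTag_phi dA dB h p)

-- ===== VERDICT (by name: the statement is the Claim_ definition above) =====
theorem build_knowledge_index_py_spec : Claim_equal_build_knowledge_index_py := by
  intro index _ _
  show build_knowledge_index_py index = build_knowledge_index_py_alt index
  unfold build_knowledge_index_py build_knowledge_index_py_alt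
  cases index with
  | none => rfl
  | some idx =>
    by_cases h : idx = []
    · simp [h]
    · simp only [if_neg h]
      rw [foldTag_phi idx PySem.Dict.empty PySem.Dict.empty rfl, List.map_map]
      apply List.map_congr_left
      intro p _
      simp [phiKI, dedupOrdered_eq_ofList]
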